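-- pv_equiv track=rewrite | github.com/timorohrer/pm4py-mdl | pm4pymdl/visualization/mvp/gen_framework2/versions/util.py | get_events_edges_map
-- ===== SOURCE A (Python) =====
-- from collections import Counter
--
-- def get_events_edges_map(key, res):
--     edges = [x for x in res["edges"] if x[0] == key]
--     edges_map = {}
--     for x in edges:
--         k = (x[1], x[2])
--         if k not in edges_map:
--             edges_map[k] = Counter()
--         edges_map[k][(x[3], x[4])] += res["edges"][x]
--     for k in edges_map:
--         edges_map[k] = len(edges_map[k])
--     return edges_map
-- ===== SOURCE B (Python) =====
-- def get_events_edges_map(key, res):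
--     seen = set()
--     counts = {}
--     for x in res["edges"]:
--         if x[0] == key:
--             q = (x[1], x[2], x[3], x[4])
--             if q not in seen:
--                 seen.add(q)
--                 p = (x[1], x[2])
--                 counts[p] = counts.get(p, 0) + 1
--     return counts
-- ===== Notes on version B (the rewrite author's own statement) =====
-- stated objective: simpler
-- what changed: A filters the edges, groups them into a dict of per-node-pair Counters keyed by target, then runs a second loop replacing each Counter by its length; B makes one pass over the edges with a single global seen-set of (pair, target) quadruples and increments a plain per-pair count directly when a quadruple is first seen — no Counters, no intermediate filtered list, no second loop.
import Mathlib
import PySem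

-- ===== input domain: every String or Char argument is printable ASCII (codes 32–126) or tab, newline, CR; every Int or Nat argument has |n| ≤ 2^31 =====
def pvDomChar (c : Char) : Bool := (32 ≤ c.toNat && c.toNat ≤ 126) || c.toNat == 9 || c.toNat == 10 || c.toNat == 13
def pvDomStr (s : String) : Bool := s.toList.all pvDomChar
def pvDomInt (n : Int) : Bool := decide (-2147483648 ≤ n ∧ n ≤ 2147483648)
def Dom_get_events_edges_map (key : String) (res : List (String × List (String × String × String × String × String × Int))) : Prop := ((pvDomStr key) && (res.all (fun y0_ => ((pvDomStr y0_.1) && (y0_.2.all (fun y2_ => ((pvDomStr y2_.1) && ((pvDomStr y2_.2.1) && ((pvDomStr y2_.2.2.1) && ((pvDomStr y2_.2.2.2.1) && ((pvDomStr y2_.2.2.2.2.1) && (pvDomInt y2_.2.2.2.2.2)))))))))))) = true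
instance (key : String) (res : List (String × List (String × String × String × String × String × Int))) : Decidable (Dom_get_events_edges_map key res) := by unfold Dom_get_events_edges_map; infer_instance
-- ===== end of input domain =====

-- B replaces A's group-into-per-pair-Counters-then-take-lengths two-phase pass by a single
-- pass with one global seen-set of quadruples and direct per-pair counting (objective: simpler).
-- res is a dict {str: dict[(s,s,s,s,s), int]}; the inner dict is the List of 6-tuples
-- (5-tuple key fields + value). Python iterates the inner dict's KEYS, so x[0..4] below are an
-- element's first five fields and res["edges"][x] is its stored Int value.

-- ===== PORT A =====
-- res["edges"][x]: first-match lookup of x's 5-tuple key in es; x is drawn from es, so it finds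
def pvKey5 (x : String × String × String × String × String × Int) : String × String × String × String × String :=
  (x.1, x.2.1, x.2.2.1, x.2.2.2.1, x.2.2.2.2.1)
def pvEdgeVal (es : List (String × String × String × String × String × Int)) (x : String × String × String × String × String × Int) : Int :=
  match es.find? (fun y => pvKey5 y == pvKey5 x) with
  | some y => y.2.2.2.2.2
  | none => 0   -- unreachable: x ∈ es

-- one iteration of A's first loop: 'if k not in edges_map: edges_map[k] = Counter()' then
-- 'edges_map[k][(x[3], x[4])] += res["edges"][x]'
def pvStepA (es : List (String × String × String × String × String × Int))
    (m : PySem.Dict (String × String) (PySem.Dict (String × String) Int))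
    (x : String × String × String × String × String × Int) :
    PySem.Dict (String × String) (PySem.Dict (String × String) Int) :=
  let k := (x.2.1, x.2.2.1)
  let m1 := if m.contains k then m else m.insert k PySem.Dict.empty
  m1.insert k ((m1.getD k PySem.Dict.empty).modify (x.2.2.2.1, x.2.2.2.2.1) (0 : Int) (· + pvEdgeVal es x))

def get_events_edges_map (key : String) (res : List (String × List (String × String × String × String × String × Int))) : List (String × String × Int) :=
  match (PySem.Dict.mk res).get? "edges" with
  | none => []   -- Python raises KeyError here: excluded by Pre_
  | some es =>
    let edges := es.filter (fun x => x.1 == key)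
    let em := edges.foldl (pvStepA es) PySem.Dict.empty
    -- 'for k in edges_map: edges_map[k] = len(edges_map[k])': replace each value in place
    em.items.map (fun p => (p.1.1, p.1.2, (p.2.size : Int)))

-- ===== PORT B =====
-- loop body of B under the 'if x[0] == key' guard: global dedupe on the quadruple, then count
def pvStepB (st : PySem.Set (String × String × String × String) × PySem.Dict (String × String) Int)
    (x : String × String × String × String × String × Int) :
    PySem.Set (String × String × String × String) × PySem.Dict (String × String) Int :=
  let q := (x.2.1, x.2.2.1, x.2.2.2.1, x.2.2.2.2.1)
  if PySem.Set.contains st.1 q then st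
  else (PySem.Set.add st.1 q,
        st.2.insert (x.2.1, x.2.2.1) (st.2.getD (x.2.1, x.2.2.1) 0 + 1))

def get_events_edges_map_alt (key : String) (res : List (String × List (String × String × String × String × String × Int))) : List (String × String × Int) :=
  match (PySem.Dict.mk res).get? "edges" with
  | none => []   -- Python raises KeyError here: excluded by Pre_
  | some es =>
    let st := es.foldl (fun st x => if x.1 == key then pvStepB st x else st)
      (PySem.Set.empty, PySem.Dict.empty)
    st.2.items.map (fun p => (p.1.1, p.1.2, p.2))

-- ===== PRECONDITION & SPEC =====
-- Pre_ excludes exactly the inputs whose outer dict has no "edges" key: Python A raises KeyError there.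
def Pre_get_events_edges_map (key : String) (res : List (String × List (String × String × String × String × String × Int))) : Prop :=
  ((PySem.Dict.mk res).get? "edges").isSome = true
instance (key : String) (res : List (String × List (String × String × String × String × String × Int))) : Decidable (Pre_get_events_edges_map key res) := by unfold Pre_get_events_edges_map; infer_instance

def pvWitness_get_events_edges_map : String × (List (String × List (String × String × String × String × String × Int))) :=
  ("k", [("edges", [("k", "a", "b", "c", "d", 1), ("k", "a", "b", "c", "e", 2), ("j", "a", "b", "c", "d", 1)])])

def Spec_get_events_edges_map (key : String) (res : List (String × List (String × String × String × String × String × Int))) (out : List (String × String × Int)) : Prop := out = get_events_edges_map_alt key res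
instance (key : String) (res : List (String × List (String × String × String × String × String × Int))) (out : List (String × String × Int)) : Decidable (Spec_get_events_edges_map key res out) := by unfold Spec_get_events_edges_map; infer_instance

-- ===== CLAIM (what is proved, stated in full; the proofs are below) =====
def Claim_equal_get_events_edges_map : Prop := ∀ (key : String) (res : List (String × List (String × String × String × String × String × Int))), Dom_get_events_edges_map key res → Pre_get_events_edges_map key res → Spec_get_events_edges_map key res (get_events_edges_map key res)

-- ===== LEMMAS AND PROOFS =====

-- the coupling invariant between A's dict-of-Counters m and B's (seen-set s, counts d)
def pvInv (m : PySem.Dict (String × String) (PySem.Dict (String × String) Int))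
    (s : PySem.Set (String × String × String × String))
    (d : PySem.Dict (String × String) Int) : Prop :=
  d.items = m.items.map (fun p => (p.1, (p.2.size : Int)))
  ∧ (∀ a b c e : String, (a, b, c, e) ∈ s ↔
      ∃ cd, m.get? (a, b) = some cd ∧ cd.contains (c, e) = true)
  ∧ m.keys.Nodup
  ∧ (∀ p ∈ m.items, p.2.keys.Nodup)

lemma pvStepA_eq (es : List (String × String × String × String × String × Int))
    (m : PySem.Dict (String × String) (PySem.Dict (String × String) Int))
    (x : String × String × String × String × String × Int) :
    pvStepA es m x = m.insert (x.2.1, x.2.2.1)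
      ((m.getD (x.2.1, x.2.2.1) PySem.Dict.empty).modify (x.2.2.2.1, x.2.2.2.2.1) (0 : Int)
        (· + pvEdgeVal es x)) := by
  unfold pvStepA
  by_cases hc : m.contains (x.2.1, x.2.2.1) = true
  · simp [hc]
  · simp only [Bool.not_eq_true] at hc
    simp only [hc, if_false, Bool.false_eq_true]
    rw [PySem.Dict.getD_insert_self, PySem.Dict.insert_insert_self,
      PySem.Dict.getD_of_not_contains _ _ hc]

lemma pv_size_keys {κ ν : Type} [BEq κ] (d : PySem.Dict κ ν) : d.size = d.keys.length := by
  simp [PySem.Dict.size, PySem.Dict.keys]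

lemma pvInv_step (es : List (String × String × String × String × String × Int))
    (x : String × String × String × String × String × Int)
    (m : PySem.Dict (String × String) (PySem.Dict (String × String) Int))
    (s : PySem.Set (String × String × String × String))
    (d : PySem.Dict (String × String) Int)
    (h : pvInv m s d) :
    pvInv (pvStepA es m x) (pvStepB (s, d) x).1 (pvStepB (s, d) x).2 := by
  obtain ⟨hd, hcoup, hnk, hnc⟩ := h
  have hkeysd : d.keys = m.keys := by
    simp only [PySem.Dict.keys, hd, List.map_map]
    rfl
  have hnkd : d.keys.Nodup := hkeysd ▸ hnk
  rw [pvStepA_eq]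
  unfold pvStepB
  by_cases hq : (x.2.1, x.2.2.1, x.2.2.2.1, x.2.2.2.2.1) ∈ s
  · -- quadruple already seen: B's state unchanged, A only bumps an existing counter value
    obtain ⟨cd, hget, hcont⟩ := (hcoup _ _ _ _).1 hq
    simp only [(PySem.Set.contains_iff s _).2 hq, if_true]
    have hgetD : m.getD (x.2.1, x.2.2.1) PySem.Dict.empty = cd :=
      PySem.Dict.getD_of_get?_eq_some _ _ hget
    have hmc : m.contains (x.2.1, x.2.2.1) = true := by
      rw [PySem.Dict.contains_eq_isSome_get?, hget]; rfl
    set cd' := (m.getD (x.2.1, x.2.2.1) PySem.Dict.empty).modify (x.2.2.2.1, x.2.2.2.2.1) (0 : Int)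
      (· + pvEdgeVal es x) with hcd'
    have hkeyscd' : cd'.keys = cd.keys := by
      rw [hcd', hgetD, PySem.Dict.keys_modify, PySem.Dict.keys_insert_of_contains _ _ hcont]
    have hsize : cd'.size = cd.size := by rw [pv_size_keys, pv_size_keys, hkeyscd']
    have hcdmem : ((x.2.1, x.2.2.1), cd) ∈ m.items :=
      (PySem.Dict.get?_eq_some_iff_mem_items m _ cd hnk).1 hget
    refine ⟨?_, ?_, ?_, ?_⟩
    · rw [PySem.Dict.items_insert_of_contains _ _ hmc, List.map_map, hd]
      refine List.map_congr_left ?_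
      intro p hp
      simp only [Function.comp]
      by_cases hpk : p.1 = (x.2.1, x.2.2.1)
      · have hpcd : p.2 = cd := by
          have := PySem.Dict.get?_of_mem_items m (k := p.1) (v := p.2) hp hnk
          rw [hpk, hget] at this
          exact (Option.some.injEq _ _ ▸ this).symm
        simp [hpk, hpcd, hsize]
      · simp [hpk]
    · intro a b c e
      by_cases hab : (a, b) = (x.2.1, x.2.2.1)
      · obtain ⟨ha, hb⟩ := Prod.mk.injEq .. ▸ hab
        subst ha; subst hb
        rw [PySem.Dict.get?_insert_self]
        constructor
        · intro hmem
          refine ⟨cd', rfl, ?_⟩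
          rw [hcd', hgetD, PySem.Dict.contains_modify]
          rcases (hcoup _ _ _ _).1 hmem with ⟨cd2, hget2, hcont2⟩
          rw [hget] at hget2
          cases hget2
          simp [hcont2]
        · rintro ⟨cd2, hcd2, hcont2⟩
          cases hcd2
          rw [hcd', hgetD, PySem.Dict.contains_modify] at hcont2
          rcases Bool.or_eq_true_iff.1 hcont2 with hv | hold
          · have : (c, e) = (x.2.2.2.1, x.2.2.2.2.1) := by exact_mod_cast beq_iff_eq.1 hv
            obtain ⟨hc, he⟩ := Prod.mk.injEq .. ▸ this
            subst hc; subst he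
            exact hq
          · exact (hcoup _ _ _ _).2 ⟨cd, hget, hold⟩
      · rw [PySem.Dict.get?_insert_of_ne _ _ hab]
        exact hcoup a b c e
    · rw [PySem.Dict.keys_insert_of_contains _ _ hmc]
      exact hnk
    · intro p hp
      rcases (PySem.Dict.mem_items_insert ..).1 hp with hp1 | ⟨hp2, -⟩
      · rw [hp1]
        simpa [hkeyscd'] using hnc _ hcdmem
      · exact hnc _ hp2
  · -- new quadruple: B records it and bumps the count, A's counter gains a fresh key
    have hnotc : PySem.Set.contains s (x.2.1, x.2.2.1, x.2.2.2.1, x.2.2.2.2.1) = false := by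
      rw [← Bool.not_eq_true]
      intro hcc
      exact hq ((PySem.Set.contains_iff s _).1 hcc)
    simp only [hnotc, Bool.false_eq_true, if_false]
    rw [PySem.Set.add_of_not_mem hq]
    set cd0 := m.getD (x.2.1, x.2.2.1) PySem.Dict.empty with hcd0
    have hcont0 : cd0.contains (x.2.2.2.1, x.2.2.2.2.1) = false := by
      rw [← Bool.not_eq_true]
      intro hcc
      cases hG : m.get? (x.2.1, x.2.2.1) with
      | none => rw [hcd0, PySem.Dict.getD_of_get?_eq_none _ _ hG] at hcc
                rw [PySem.Dict.contains_empty] at hcc; cases hcc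
      | some cd => rw [hcd0, PySem.Dict.getD_of_get?_eq_some _ _ hG] at hcc
                   exact hq ((hcoup _ _ _ _).2 ⟨cd, hG, hcc⟩)
    set cd' := cd0.modify (x.2.2.2.1, x.2.2.2.2.1) (0 : Int) (· + pvEdgeVal es x) with hcd'
    have hkeyscd' : cd'.keys = cd0.keys ++ [(x.2.2.2.1, x.2.2.2.2.1)] := by
      rw [hcd', PySem.Dict.keys_modify, PySem.Dict.keys_insert_of_not_contains _ _ hcont0]
    have hsize' : (cd'.size : Int) = (cd0.size : Int) + 1 := by
      rw [pv_size_keys, pv_size_keys, hkeyscd', List.length_append]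
      simp only [List.length_singleton]
      push_cast; ring
    have hcoup' : ∀ a b c e : String, ((a, b, c, e) ∈ s ∨ (a, b, c, e) = (x.2.1, x.2.2.1, x.2.2.2.1, x.2.2.2.2.1)) ↔
        ∃ cd2, (m.insert (x.2.1, x.2.2.1) cd').get? (a, b) = some cd2 ∧ cd2.contains (c, e) = true := by
      intro a b c e
      by_cases hab : (a, b) = (x.2.1, x.2.2.1)
      · obtain ⟨ha, hb⟩ := Prod.mk.injEq .. ▸ hab
        subst ha; subst hb
        rw [PySem.Dict.get?_insert_self]
        constructor
        · rintro (hmem | hqe)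
          · refine ⟨cd', rfl, ?_⟩
            rcases (hcoup _ _ _ _).1 hmem with ⟨cd2, hget2, hcont2⟩
            rw [hcd', PySem.Dict.contains_modify]
            rw [hcd0, PySem.Dict.getD_of_get?_eq_some _ _ hget2]
            simp [hcont2]
          · refine ⟨cd', rfl, ?_⟩
            have hce : (c, e) = (x.2.2.2.1, x.2.2.2.2.1) :=
              congrArg (fun t : String × String × String × String => t.2.2) hqe
            rw [hcd', PySem.Dict.contains_modify, hce]
            simp
        · rintro ⟨cd2, hcd2, hcont2⟩
          cases hcd2
          rw [hcd', PySem.Dict.contains_modify] at hcont2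
          rcases Bool.or_eq_true_iff.1 hcont2 with hv | hold
          · right
            have : (c, e) = (x.2.2.2.1, x.2.2.2.2.1) := by exact_mod_cast beq_iff_eq.1 hv
            obtain ⟨hc, he⟩ := Prod.mk.injEq .. ▸ this
            subst hc; subst he; rfl
          · left
            cases hG : m.get? (x.2.1, x.2.2.1) with
            | none => rw [hcd0, PySem.Dict.getD_of_get?_eq_none _ _ hG,
                        PySem.Dict.contains_empty] at hold
                      cases hold
            | some cd => rw [hcd0, PySem.Dict.getD_of_get?_eq_some _ _ hG] at hold
                         exact (hcoup _ _ _ _).2 ⟨cd, hG, hold⟩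
      · rw [PySem.Dict.get?_insert_of_ne _ _ hab]
        constructor
        · rintro (hmem | hqe)
          · exact (hcoup _ _ _ _).1 hmem
          · exact absurd (congrArg (fun t : String × String × String × String => ((t.1, t.2.1) : String × String)) hqe) hab
        · intro hrhs
          exact Or.inl ((hcoup a b c e).2 hrhs)
    cases hG : m.get? (x.2.1, x.2.2.1) with
    | some cd =>
      have hmc : m.contains (x.2.1, x.2.2.1) = true := by
        rw [PySem.Dict.contains_eq_isSome_get?, hG]; rfl
      have hdc : d.contains (x.2.1, x.2.2.1) = true := by
        rw [PySem.Dict.contains_iff_mem_keys, hkeysd]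
        exact (PySem.Dict.contains_iff_mem_keys m _).1 hmc
      have hcdmem : ((x.2.1, x.2.2.1), cd) ∈ m.items :=
        (PySem.Dict.get?_eq_some_iff_mem_items m _ cd hnk).1 hG
      have hdmem : ((x.2.1, x.2.2.1), (cd.size : Int)) ∈ d.items := by
        rw [hd]
        exact List.mem_map.2 ⟨_, hcdmem, rfl⟩
      have hdgetD : d.getD (x.2.1, x.2.2.1) 0 = (cd.size : Int) :=
        PySem.Dict.getD_of_mem_items d hdmem hnkd 0
      have hcd0cd : cd0 = cd := PySem.Dict.getD_of_get?_eq_some _ _ hG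
      refine ⟨?_, fun a b c e => by
          rw [List.mem_append, List.mem_singleton]; exact hcoup' a b c e, ?_, ?_⟩
      · rw [PySem.Dict.items_insert_of_contains _ _ hdc,
           PySem.Dict.items_insert_of_contains _ _ hmc, List.map_map, hd, List.map_map]
        refine List.map_congr_left ?_
        intro p hp
        simp only [Function.comp]
        by_cases hpk : p.1 = (x.2.1, x.2.2.1)
        · have hpcd : p.2 = cd := by
            have := PySem.Dict.get?_of_mem_items m (k := p.1) (v := p.2) hp hnk
            rw [hpk, hG] at this
            exact (Option.some.injEq _ _ ▸ this).symm
          simp only [hpk, hpcd, beq_self_eq_true, if_true, hdgetD]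
          rw [hsize', hcd0cd]
        · simp [hpk]
      · rw [PySem.Dict.keys_insert_of_contains _ _ hmc]
        exact hnk
      · intro p hp
        rcases (PySem.Dict.mem_items_insert ..).1 hp with hp1 | ⟨hp2, -⟩
        · rw [hp1]
          show cd'.keys.Nodup
          rw [hkeyscd', hcd0cd, List.nodup_append]
          refine ⟨hnc _ hcdmem, List.nodup_singleton _, ?_⟩
          intro y hy z hz
          rw [List.mem_singleton] at hz
          subst hz
          intro heq
          subst heq
          have hcc : cd0.contains (x.2.2.2.1, x.2.2.2.2.1) = true := by
            rw [hcd0cd]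
            exact (PySem.Dict.contains_iff_mem_keys cd _).2 hy
          exact absurd hcc (by simp [hcont0])
        · exact hnc _ hp2
    | none =>
      have hmc : m.contains (x.2.1, x.2.2.1) = false := by
        rw [PySem.Dict.contains_eq_isSome_get?, hG]; rfl
      have hdc : d.contains (x.2.1, x.2.2.1) = false := by
        rw [← Bool.not_eq_true, PySem.Dict.contains_iff_mem_keys, hkeysd]
        rw [← PySem.Dict.contains_iff_mem_keys]
        simp [hmc]
      have hcd0e : cd0 = PySem.Dict.empty := PySem.Dict.getD_of_get?_eq_none _ _ hG
      refine ⟨?_, fun a b c e => by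
          rw [List.mem_append, List.mem_singleton]; exact hcoup' a b c e, ?_, ?_⟩
      · rw [PySem.Dict.items_insert_of_not_contains _ _ hdc,
           PySem.Dict.items_insert_of_not_contains _ _ hmc, List.map_append, hd,
           PySem.Dict.getD_of_not_contains _ _ hdc]
        simp only [List.map_cons, List.map_nil]
        congr 2
        rw [hsize', hcd0e]
        simp [pv_size_keys, PySem.Dict.keys, PySem.Dict.empty]
      · rw [PySem.Dict.keys_insert_of_not_contains _ _ hmc, List.nodup_append]
        refine ⟨hnk, List.nodup_singleton _, ?_⟩
        intro y hy z hz
        rw [List.mem_singleton] at hz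
        subst hz
        intro heq
        subst heq
        exact absurd ((PySem.Dict.contains_iff_mem_keys m _).2 hy) (by simp [hmc])
      · intro p hp
        rcases (PySem.Dict.mem_items_insert ..).1 hp with hp1 | ⟨hp2, -⟩
        · rw [hp1]
          rw [hkeyscd', hcd0e]
          simp [PySem.Dict.keys, PySem.Dict.empty]
        · exact hnc _ hp2

lemma pvInv_fold (es l : List (String × String × String × String × String × Int))
    (m : PySem.Dict (String × String) (PySem.Dict (String × String) Int))
    (s : PySem.Set (String × String × String × String))
    (d : PySem.Dict (String × String) Int)
    (h : pvInv m s d) :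
    pvInv (l.foldl (pvStepA es) m) ((l.foldl pvStepB (s, d)).1) ((l.foldl pvStepB (s, d)).2) := by
  induction l generalizing m s d with
  | nil => exact h
  | cons x t ih =>
    simpa using ih _ _ _ (pvInv_step es x m s d h)

lemma pv_main (key : String) (es : List (String × String × String × String × String × Int)) :
    ((es.filter (fun x => x.1 == key)).foldl (pvStepA es) PySem.Dict.empty).items.map
        (fun p => (p.1.1, p.1.2, (p.2.size : Int)))
      = ((es.foldl (fun st x => if x.1 == key then pvStepB st x else st)
          (PySem.Set.empty, PySem.Dict.empty)).2).items.map (fun p => (p.1.1, p.1.2, p.2)) := by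
  rw [PySem.List.foldl_if_eq_foldl_filter (p := fun x => x.1 == key) (f := pvStepB)]
  have h := pvInv_fold es (es.filter (fun x => x.1 == key)) PySem.Dict.empty
    PySem.Set.empty PySem.Dict.empty (by
      refine ⟨by simp [PySem.Dict.empty], ?_, by simp [PySem.Dict.empty, PySem.Dict.keys], by simp [PySem.Dict.empty]⟩
      intro a b c e
      constructor
      · intro hmem; cases hmem
      · rintro ⟨cd, hcd, _⟩
        simp [PySem.Dict.get?_empty] at hcd)
  obtain ⟨hitems, -, -, -⟩ := h
  rw [hitems, List.map_map]
  rfl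

-- ===== VERDICT (by name: the statement is the Claim_ definition above) =====
theorem get_events_edges_map_spec : Claim_equal_get_events_edges_map := by
  intro key res _ hpre
  unfold Spec_get_events_edges_map get_events_edges_map get_events_edges_map_alt
  unfold Pre_get_events_edges_map at hpre
  cases hes : (PySem.Dict.mk res).get? "edges" with
  | none => simp [hes] at hpre
  | some es => exact pv_main key es
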